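-- pv_equiv track=rewrite | github.com/OmarSalvatierra99/portfolio | scripts/deploy_vps.py | assign_ports
-- ===== SOURCE A (Python) =====
-- from typing import Dict, List, Tuple
--
-- PORT_START = 5001
--
-- FIXED_PORTS = {
--     "pasanotas": 5002,  # Fixed requirement
-- }
--
-- def assign_ports(projects: List[str]) -> Dict[str, int]:
--     """Assign stable sequential ports to projects."""
--     port_map = {}
--     current_port = PORT_START
--
--     # Sort projects for deterministic assignment
--     sorted_projects = sorted(projects)
--
--     for project in sorted_projects:
--         # Check if project has a fixed port
--         if project in FIXED_PORTS:
--             port_map[project] = FIXED_PORTS[project]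
--         else:
--             # Skip ports that are already assigned
--             while current_port in FIXED_PORTS.values() or current_port in port_map.values():
--                 current_port += 1
--             port_map[project] = current_port
--             current_port += 1
--
--     return port_map
-- ===== SOURCE B (Python) =====
-- from typing import Dict, List
--
-- PORT_START = 5001
--
-- FIXED_PORTS = {
--     "pasanotas": 5002,  # Fixed requirement
-- }
--
-- def assign_ports(projects: List[str]) -> Dict[str, int]:
--     """Assign stable sequential ports to projects."""
--     names = sorted(projects)
--     reserved = sorted(set(FIXED_PORTS.values()))
--     # how many sequential ports we will hand out (one per non-fixed occurrence)
--     need = sum(1 for n in names if n not in FIXED_PORTS)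
--     # the first `need` integers >= PORT_START that are not reserved, computed up front
--     pool = [p for p in range(PORT_START, PORT_START + need + len(reserved))
--             if p not in reserved][:need]
--     seq = iter(pool)
--     return {n: FIXED_PORTS[n] if n in FIXED_PORTS else next(seq) for n in names}
-- ===== Notes on version B (the rewrite author's own statement) =====
-- stated objective: faster
-- what changed: A interleaves an inner while that rescans FIXED_PORTS.values() and the growing port_map.values() at every step; B precomputes the exact pool of free sequential ports once (a counted, filtered range) and assigns them positionally in one pass over the sorted names.
import Mathlib
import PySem

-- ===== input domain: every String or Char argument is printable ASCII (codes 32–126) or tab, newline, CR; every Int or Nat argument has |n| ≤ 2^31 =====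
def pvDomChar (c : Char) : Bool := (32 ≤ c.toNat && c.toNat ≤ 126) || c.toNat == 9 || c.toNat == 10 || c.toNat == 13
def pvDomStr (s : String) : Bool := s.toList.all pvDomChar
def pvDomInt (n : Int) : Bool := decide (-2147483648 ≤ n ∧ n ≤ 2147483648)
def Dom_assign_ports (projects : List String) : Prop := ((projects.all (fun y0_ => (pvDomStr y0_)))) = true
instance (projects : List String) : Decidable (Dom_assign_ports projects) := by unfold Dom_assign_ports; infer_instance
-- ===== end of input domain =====

-- B precomputes the free-port pool once instead of A's inner while over the growing map's values (objective: faster, one pass after the sort).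

def PORT_START : Int := 5001

def FIXED_PORTS : PySem.Dict String Int := PySem.Dict.ofList [("pasanotas", 5002)]

-- ===== PORT A =====
-- 'while current_port in FIXED_PORTS.values() or current_port in port_map.values(): current_port += 1'
-- fuel = vals.length + 1 is a totality guard only: the loop leaves `vals` unchanged and visits
-- strictly increasing candidates, so it runs at most vals.length times before the test fails.
def skipPorts : Nat → List Int → Int → Int
  | 0, _, c => c
  | fuel + 1, vals, c => if c ∈ vals then skipPorts fuel vals (c + 1) else c

def stepA (st : PySem.Dict String Int × Int) (project : String) : PySem.Dict String Int × Int :=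
  if FIXED_PORTS.contains project then
    -- FIXED_PORTS[project]: guarded by the contains test, so getD is exact here
    (st.1.insert project (FIXED_PORTS.getD project 0), st.2)
  else
    let vals := FIXED_PORTS.values ++ st.1.values
    let p := skipPorts (vals.length + 1) vals st.2
    (st.1.insert project p, p + 1)

def assign_ports (projects : List String) : List (String × Int) :=
  let sorted_projects := PySem.List.sorted projects (fun s => s) false
  (sorted_projects.foldl stepA (PySem.Dict.empty, PORT_START)).1.items

-- ===== PORT B =====
-- `next(seq)` on `seq = iter(pool)`: the iterator is its position k in pool; it is never
-- exhausted (pool has exactly `need` elements), so getD's default is unreachable.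
def stepB (pool : List Int) (st : PySem.Dict String Int × Nat) (name : String) :
    PySem.Dict String Int × Nat :=
  match FIXED_PORTS.get? name with
  | some v => (st.1.insert name v, st.2)
  | none => (st.1.insert name (pool.getD st.2 0), st.2 + 1)

def assign_ports_alt (projects : List String) : List (String × Int) :=
  let names := PySem.List.sorted projects (fun s => s) false
  let reserved : List Int :=
    PySem.List.sorted (PySem.Set.ofList FIXED_PORTS.values) (fun x => x) false
  let need : Nat := names.countP (fun n => !(FIXED_PORTS.contains n))
  let pool : List Int :=
    ((PySem.List.pyRange PORT_START (PORT_START + (need : Int) + (reserved.length : Int)) 1).filter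
      (fun p => !(reserved.contains p))).take need
  (names.foldl (stepB pool) (PySem.Dict.empty, 0)).1.items

-- ===== PRECONDITION & SPEC =====
def Spec_assign_ports (projects : List String) (out : List (String × Int)) : Prop := out = assign_ports_alt projects
instance (projects : List String) (out : List (String × Int)) : Decidable (Spec_assign_ports projects out) := by unfold Spec_assign_ports; infer_instance

-- ===== CLAIM (what is proved, stated in full; the proofs are below) =====
def Claim_equal_assign_ports : Prop := ∀ (projects : List String), Dom_assign_ports projects → Spec_assign_ports projects (assign_ports projects)

-- ===== LEMMAS AND PROOFS =====

-- the k-th sequential port either program hands out (5001, 5003, 5004, ...)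
def freeP (k : Nat) : Int := if k = 0 then 5001 else 5002 + k

-- A's `current_port` after k sequential assignments
def cA : Nat -> Int
  | 0 => 5001
  | k + 1 => freeP k + 1

lemma fixed_mk : FIXED_PORTS = PySem.Dict.mk [("pasanotas", 5002)] := by rfl

lemma values_FIXED : FIXED_PORTS.values = [5002] := by rfl

lemma get?_FIXED (x : String) :
    FIXED_PORTS.get? x = if x = "pasanotas" then some 5002 else none := by
  by_cases h : x = "pasanotas"
  · subst h; rfl
  · rw [fixed_mk, PySem.Dict.get?_mk_cons, if_neg (by simp [Ne.symm h]), if_neg h]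
    exact PySem.Dict.get?_empty x

lemma cA_mono (k : Nat) : cA k <= cA (k + 1) := by
  cases k with
  | zero => simp [cA, freeP]
  | succ j => simp [cA, freeP]; omega

lemma freeP_lt_cA_succ (k : Nat) : freeP k < cA (k + 1) := by
  simp only [cA]
  omega

lemma skip_notmem (fuel : Nat) (vals : List Int) (c : Int) (h : c ∉ vals) :
    skipPorts (fuel + 1) vals c = c := by
  simp [skipPorts, h]

lemma skip_eq (pmv : List Int) (k : Nat)
    (hInv : ∀ v ∈ pmv, v = 5002 ∨ v < cA k) :
    skipPorts ((5002 :: pmv).length + 1) (5002 :: pmv) (cA k) = freeP k := by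
  have hlen : (5002 :: pmv).length + 1 = pmv.length + 1 + 1 := by simp
  rw [hlen]
  match k with
  | 0 =>
    have h : (5001 : Int) ∉ (5002 :: pmv) := by
      simp only [List.mem_cons]
      rintro (h | h)
      · omega
      · have h' := hInv _ h
        simp only [cA] at h'
        omega
    exact skip_notmem _ _ _ h
  | 1 =>
    have hc : cA 1 = 5002 := by simp [cA, freeP]
    have hf : freeP 1 = 5003 := by simp [freeP]
    rw [hc, hf]
    have hm : (5002 : Int) ∈ (5002 :: pmv) := by simp
    have hstep : skipPorts (pmv.length + 1 + 1) (5002 :: pmv) 5002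
        = skipPorts (pmv.length + 1) (5002 :: pmv) 5003 := by
      simp [skipPorts, hm]
    rw [hstep]
    have h3 : (5003 : Int) ∉ (5002 :: pmv) := by
      simp only [List.mem_cons]
      rintro (h | h)
      · omega
      · have h' := hInv _ h
        rw [hc] at h'
        omega
    exact skip_notmem _ _ _ h3
  | (j + 2) =>
    have hc : cA (j + 2) = 5004 + (j : Int) := by simp [cA, freeP]; omega
    have hf : freeP (j + 2) = 5004 + (j : Int) := by simp [freeP]; omega
    rw [hc, hf]
    have h : (5004 + (j : Int)) ∉ (5002 :: pmv) := by
      simp only [List.mem_cons]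
      rintro (h | h)
      · omega
      · have h' := hInv _ h
        rw [hc] at h'
        omega
    exact skip_notmem _ _ _ h

lemma pool_getD (need k : Nat) (hk : k < need) :
    (((PySem.List.pyRange PORT_START
          (PORT_START + (need : Int) + ((([(5002 : Int)] : List Int)).length : Int)) 1).filter
        (fun p => !(([(5002 : Int)] : List Int).contains p))).take need).getD k 0 = freeP k := by
  have hb : PORT_START + (need : Int) + ((([(5002 : Int)] : List Int)).length : Int)
      = 5002 + (need : Int) := by simp [PORT_START]; ring
  rw [hb, show PORT_START = (5001 : Int) from rfl]
  have hn : 1 <= need := by omega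
  have hsplit := PySem.List.pyRange_one_append 5001 5003 (5002 + (need : Int))
      (by omega) (by omega)
  rw [hsplit, List.filter_append]
  have h1 : (PySem.List.pyRange 5001 5003 1).filter
      (fun p => !(([(5002 : Int)] : List Int).contains p)) = [5001] := by decide
  have h2 : (PySem.List.pyRange 5003 (5002 + (need : Int)) 1).filter
      (fun p => !(([(5002 : Int)] : List Int).contains p))
      = PySem.List.pyRange 5003 (5002 + (need : Int)) 1 := by
    apply List.filter_eq_self.mpr
    intro x hx
    have hmem := (PySem.List.mem_pyRange_one).mp hx
    have hne : x ≠ 5002 := by omega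
    simp [hne]
  rw [h1, h2]
  have hlen : (([5001] : List Int) ++ PySem.List.pyRange 5003 (5002 + (need : Int)) 1).length
      = need := by
    rw [List.length_append, PySem.List.length_pyRange_one]
    simp only [List.length_cons, List.length_nil]
    omega
  rw [List.take_of_length_le (by omega)]
  cases k with
  | zero => simp [freeP]
  | succ j =>
    have hj : j < (PySem.List.pyRange 5003 (5002 + (need : Int)) 1).length := by
      rw [PySem.List.length_pyRange_one]; omega
    simp only [List.singleton_append, List.getD_cons_succ]
    rw [List.getD, List.getElem?_eq_getElem hj, PySem.List.getElem_pyRange_one]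
    simp only [Option.getD_some, freeP]
    simp
    omega

lemma main_fold (pool : List Int) (need : Nat)
    (hp : ∀ j, j < need → pool.getD j 0 = freeP j) :
    ∀ (rest : List String) (pm : PySem.Dict String Int) (k : Nat),
      k + rest.countP (fun n => !(FIXED_PORTS.contains n)) <= need →
      (∀ v ∈ pm.values, v = 5002 ∨ v < cA k) →
      (rest.foldl stepA (pm, cA k)).1 = (rest.foldl (stepB pool) (pm, k)).1
  | [], pm, k, _, _ => rfl
  | x :: rest, pm, k, hcnt, hInv => by
    by_cases hx : x = "pasanotas"
    · subst hx
      have hcA : stepA (pm, cA k) "pasanotas" = (pm.insert "pasanotas" 5002, cA k) := rfl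
      have hcB : stepB pool (pm, k) "pasanotas" = (pm.insert "pasanotas" 5002, k) := rfl
      simp only [List.foldl_cons, hcA, hcB]
      apply main_fold pool need hp rest
      · have hone : List.countP (fun n => !(FIXED_PORTS.contains n)) ("pasanotas" :: rest)
            = List.countP (fun n => !(FIXED_PORTS.contains n)) rest := by
          rw [List.countP_cons]
          simp [fixed_mk, PySem.Dict.contains_mk]
        omega
      · intro v hv
        rcases PySem.Dict.mem_values_insert _ _ _ _ hv with h | h
        · left; omega
        · exact hInv v h
    · have hcont : FIXED_PORTS.contains x = false := by
        rw [fixed_mk, PySem.Dict.contains_mk]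
        simp [Ne.symm hx]
      have hget : FIXED_PORTS.get? x = none := by
        rw [get?_FIXED, if_neg hx]
      have hk : k < need := by
        rw [List.countP_cons] at hcnt
        simp [hcont] at hcnt
        omega
      have hcA : stepA (pm, cA k) x = (pm.insert x (freeP k), cA (k + 1)) := by
        simp only [stepA, hcont, Bool.false_eq_true, if_false, values_FIXED,
          List.singleton_append]
        rw [skip_eq pm.values k hInv]
        rfl
      have hcB : stepB pool (pm, k) x = (pm.insert x (freeP k), k + 1) := by
        simp only [stepB, hget]
        rw [hp k hk]
      simp only [List.foldl_cons, hcA, hcB]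
      apply main_fold pool need hp rest
      · have hone : List.countP (fun n => !(FIXED_PORTS.contains n)) (x :: rest)
            = List.countP (fun n => !(FIXED_PORTS.contains n)) rest + 1 := by
          rw [List.countP_cons]
          simp [hcont]
        omega
      · intro v hv
        rcases PySem.Dict.mem_values_insert _ _ _ _ hv with h | h
        · right; rw [h]; exact freeP_lt_cA_succ k
        · rcases hInv v h with h' | h'
          · left; exact h'
          · right; exact lt_of_lt_of_le h' (cA_mono k)

lemma reserved_eval :
    PySem.List.sorted (PySem.Set.ofList FIXED_PORTS.values) (fun x => x) false
      = [(5002 : Int)] := by rfl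

-- ===== VERDICT (by name: the statement is the Claim_ definition above) =====
theorem assign_ports_spec : Claim_equal_assign_ports := by
  intro projects _
  unfold Spec_assign_ports
  simp only [assign_ports, assign_ports_alt, reserved_eval]
  congr 1
  have hP : (PORT_START : Int) = cA 0 := rfl
  conv_lhs => rw [hP]
  exact main_fold _
    ((PySem.List.sorted projects (fun s => s) false).countP (fun n => !(FIXED_PORTS.contains n)))
    (fun j hj => pool_getD _ j hj)
    (PySem.List.sorted projects (fun s => s) false) PySem.Dict.empty 0 (by omega)
    (fun v hv => by
      rw [show (PySem.Dict.empty : PySem.Dict String Int).values = [] from rfl] at hv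
      simp at hv)
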